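-- pv_equiv track=rewrite | github.com/jaydrennan/sudoku_solver | sudoku_solver/validate_puzzle.py | rows_valid
-- ===== SOURCE A (Python) =====
-- def rows_valid(grid):
--     for start in range(0, 83, 9):
--         end = start + 9
--         for i in range(1, 10):
--             row = grid[start:end]
--             count = row.count(i)
--             if count > 1:
--                 return False
--     return True
-- ===== SOURCE B (Python) =====
-- def rows_valid(grid):
--     for start in range(0, 83, 9):
--         seen = set()
--         for v in grid[start:start + 9]:
--             if 1 <= v <= 9:
--                 if v in seen:
--                     return False
--                 seen.add(v)
--     return True
-- ===== Notes on version B (the rewrite author's own statement) =====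
-- stated objective: simpler
-- what changed: The inner per-digit loop (nine .count scans of each row slice) is removed: B makes one pass over each row's elements, maintaining a 'seen' set and failing on the first repeated digit in 1..9.
import Mathlib
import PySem

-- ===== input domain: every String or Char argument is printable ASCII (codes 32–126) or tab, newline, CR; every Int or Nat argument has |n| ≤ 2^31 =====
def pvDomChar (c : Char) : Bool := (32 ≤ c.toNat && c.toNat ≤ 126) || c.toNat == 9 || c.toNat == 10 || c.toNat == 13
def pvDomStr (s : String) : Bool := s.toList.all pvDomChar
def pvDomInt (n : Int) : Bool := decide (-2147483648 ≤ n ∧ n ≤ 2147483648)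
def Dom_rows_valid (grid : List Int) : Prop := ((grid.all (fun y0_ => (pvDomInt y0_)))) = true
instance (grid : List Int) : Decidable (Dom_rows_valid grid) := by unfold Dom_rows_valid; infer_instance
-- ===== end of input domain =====

-- B replaces A's nine per-digit count scans of each row slice by one element pass with a 'seen' set (simpler).

-- ===== PORT A =====
-- inner 'for i in range(1, 10): row = grid[start:end]; count = row.count(i); if count > 1: return False'
def rvInnerA (grid : List Int) (start : Int) (is_ : List Int) : Bool :=
  match is_ with
  | [] => true
  | i :: rest =>
    let row := PySem.List.slice grid (some start) (some (start + 9))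
    let count := PySem.List.count row i
    if count > 1 then false else rvInnerA grid start rest

-- outer 'for start in range(0, 83, 9)' with early return False
def rvOuterA (grid : List Int) (starts : List Int) : Bool :=
  match starts with
  | [] => true
  | s :: rest => if rvInnerA grid s (PySem.List.pyRange 1 10 1) then rvOuterA grid rest else false

def rows_valid (grid : List Int) : Bool :=
  rvOuterA grid (PySem.List.pyRange 0 83 9)

-- ===== PORT B =====
-- 'for v in row: if 1 <= v <= 9: if v in seen: return False; seen.add(v)'
def rvScan (seen : PySem.Set Int) (row : List Int) : Bool :=
  match row with
  | [] => true
  | v :: rest =>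
    if 1 ≤ v ∧ v ≤ 9 then
      if PySem.Set.contains seen v then false
      else rvScan (PySem.Set.add seen v) rest
    else rvScan seen rest

def rvOuterB (grid : List Int) (starts : List Int) : Bool :=
  match starts with
  | [] => true
  | s :: rest =>
    if rvScan PySem.Set.empty (PySem.List.slice grid (some s) (some (s + 9))) then
      rvOuterB grid rest
    else false

def rows_valid_alt (grid : List Int) : Bool :=
  rvOuterB grid (PySem.List.pyRange 0 83 9)

-- ===== PRECONDITION & SPEC =====
def Spec_rows_valid (grid : List Int) (out : Bool) : Prop := out = rows_valid_alt grid
instance (grid : List Int) (out : Bool) : Decidable (Spec_rows_valid grid out) := by unfold Spec_rows_valid; infer_instance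

-- ===== CLAIM (what is proved, stated in full; the proofs are below) =====
def Claim_equal_rows_valid : Prop := ∀ (grid : List Int), Dom_rows_valid grid → Spec_rows_valid grid (rows_valid grid)

-- ===== LEMMAS AND PROOFS =====

-- B's seen-set scan succeeds iff every digit 1..9 occurs at most once in row, counting a prior sighting recorded in seen.
theorem rvScan_iff (row : List Int) (seen : PySem.Set Int) :
    rvScan seen row = true ↔
      ∀ i : Int, 1 ≤ i → i ≤ 9 → row.count i + (if i ∈ seen then 1 else 0) ≤ 1 := by
  induction row generalizing seen with
  | nil =>
    simp [rvScan]
    intro i _ _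
    split <;> omega
  | cons v rest ih =>
    simp only [rvScan]
    by_cases hv : 1 ≤ v ∧ v ≤ 9
    · simp only [if_pos hv]
      by_cases hmem : v ∈ seen
      · have hc : PySem.Set.contains seen v = true := (PySem.Set.contains_iff seen v).mpr hmem
        simp only [hc, if_true]
        apply iff_of_false (by simp)
        intro h
        have := h v hv.1 hv.2
        rw [List.count_cons_self] at this
        simp [hmem] at this
      · have hc : PySem.Set.contains seen v = false := by
          cases h : PySem.Set.contains seen v with
          | false => rfl
          | true => exact absurd ((PySem.Set.contains_iff seen v).mp h) hmem
        simp only [hc, Bool.false_eq_true, if_false, ih]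
        refine ⟨fun h i h1 h9 => ?_, fun h i h1 h9 => ?_⟩
        · rcases eq_or_ne i v with rfl | hiv
          · have := h i h1 h9
            rw [List.count_cons_self]
            simp [PySem.Set.mem_add] at this
            simp [hmem]
            omega
          · have := h i h1 h9
            rw [List.count_cons_of_ne (Ne.symm hiv)]
            simp [PySem.Set.mem_add, hiv] at this
            exact this
        · rcases eq_or_ne i v with rfl | hiv
          · have := h i h1 h9
            rw [List.count_cons_self] at this
            simp [hmem] at this
            simp [PySem.Set.mem_add]
            omega
          · have := h i h1 h9
            rw [List.count_cons_of_ne (Ne.symm hiv)] at this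
            simp [PySem.Set.mem_add, hiv]
            exact this
    · simp only [if_neg hv, ih]
      refine forall_congr' fun i => ?_
      constructor <;> intro h h1 h9 <;>
        have hiv : i ≠ v := fun e => hv (e ▸ ⟨h1, h9⟩)
      · have := h h1 h9
        rw [List.count_cons_of_ne (Ne.symm hiv)]
        exact this
      · have := h h1 h9
        rw [List.count_cons_of_ne (Ne.symm hiv)] at this
        exact this

-- A's inner digit loop succeeds iff no digit in the list occurs more than once in the row slice.
theorem rvInnerA_iff (grid : List Int) (start : Int) (is_ : List Int) :
    rvInnerA grid start is_ = true ↔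
      ∀ i ∈ is_, (PySem.List.slice grid (some start) (some (start + 9))).count i ≤ 1 := by
  induction is_ with
  | nil => simp [rvInnerA]
  | cons i rest ih =>
    simp only [rvInnerA, PySem.List.count_eq]
    split
    · rename_i h
      simp only [Bool.false_eq_true, false_iff]
      exact fun hall => absurd (hall i (by simp)) (by omega)
    · rename_i h
      simp only [ih, List.mem_cons]
      constructor
      · rintro hr j (rfl | hj)
        · omega
        · exact hr j hj
      · intro hr j hj
        exact hr j (Or.inr hj)

-- per-row: A's digit loop and B's seen-set scan return the same Bool
theorem row_eq (grid : List Int) (s : Int) :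
    rvInnerA grid s (PySem.List.pyRange 1 10 1) =
      rvScan PySem.Set.empty (PySem.List.slice grid (some s) (some (s + 9))) := by
  rw [Bool.eq_iff_iff, rvInnerA_iff, rvScan_iff]
  constructor
  · intro h i h1 h9
    have := h i (by rw [PySem.List.mem_pyRange_one]; omega)
    simpa [PySem.Set.empty] using this
  · intro h i hi
    rw [PySem.List.mem_pyRange_one] at hi
    have := h i hi.1 (by omega)
    simpa [PySem.Set.empty] using this

theorem outer_eq (grid : List Int) (starts : List Int) :
    rvOuterA grid starts = rvOuterB grid starts := by
  induction starts with
  | nil => rfl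
  | cons s rest ih => simp only [rvOuterA, rvOuterB, row_eq, ih]

-- ===== VERDICT (by name: the statement is the Claim_ definition above) =====
theorem rows_valid_spec : Claim_equal_rows_valid := by
  intro grid _
  show rows_valid grid = rows_valid_alt grid
  exact outer_eq grid _
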